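-- pv_equiv track=rewrite | github.com/scsvv/python-study | hm-10/treangle_sequence.py | count_first
-- ===== SOURCE A (Python) =====
-- def count_first(nums, n: int) -> list:
--     def loop(k: int) -> int:
--         if k == 1:
--             return 1
--         return loop(k - loop(k - 1)) + 1
--
--     sequence = list()
--
--     for i in range(1, n + 1):
--         sequence.append(loop(i))
--
--     return sequence
-- ===== SOURCE B (Python) =====
-- def count_first(nums, n: int) -> list:
--     # Bottom-up memoization: each term computed in O(1) from earlier terms.
--     memo = [0, 1]  # memo[k] holds loop(k) for k >= 1; memo[0] is a placeholder
--     for k in range(2, n + 1):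
--         memo.append(memo[k - memo[k - 1]] + 1)
--     return memo[1:n + 1]
-- ===== Notes on version B (the rewrite author's own statement) =====
-- stated objective: faster
-- what changed: Replaces the naive recursion loop(k)=loop(k-loop(k-1))+1, recomputed from scratch for every i, by a single bottom-up memo array in which each term is computed in O(1) from two earlier entries; intended as faster (a timing run measured ~294x at n=64, A timed out at n=256 where B returned).
import Mathlib
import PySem

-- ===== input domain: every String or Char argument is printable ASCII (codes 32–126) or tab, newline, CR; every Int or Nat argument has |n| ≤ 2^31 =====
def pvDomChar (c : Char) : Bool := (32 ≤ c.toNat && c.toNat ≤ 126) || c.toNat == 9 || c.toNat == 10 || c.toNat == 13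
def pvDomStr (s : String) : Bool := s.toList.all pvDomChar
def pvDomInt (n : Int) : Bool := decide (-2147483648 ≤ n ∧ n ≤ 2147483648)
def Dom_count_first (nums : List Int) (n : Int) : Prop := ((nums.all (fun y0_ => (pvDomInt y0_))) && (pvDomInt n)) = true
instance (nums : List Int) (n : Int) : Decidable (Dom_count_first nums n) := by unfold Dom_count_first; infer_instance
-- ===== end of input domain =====

-- B replaces A's naive recursion loop(k)=loop(k-loop(k-1))+1 (recomputed per term) by a
-- bottom-up memo array, each term computed in O(1) from earlier entries; intended as faster
-- (timing run measured ~294x at n=64; A timed out at n=256 where B returned).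

-- ===== PORT A =====
-- Python's inner `loop` is naive recursion; the Nat fuel only makes it total in Lean
-- (fuel i.toNat always suffices: the recursion depth of loop(i) is below i).
def loopA : Nat → Int → Int
  | 0, _ => 1
  | f + 1, k => if k = 1 then 1 else loopA f (k - loopA f (k - 1)) + 1

def count_first (nums : List Int) (n : Int) : List Int :=
  (PySem.List.pyRange 1 (n + 1) 1).map (fun i => loopA i.toNat i)

-- ===== PORT B =====
-- memo = [0, 1]; for k in range(2, n+1): memo.append(memo[k - memo[k-1]] + 1); return memo[1:n+1]
-- (the pyGetD default 0 is never used: both indices are always in range here)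
def count_first_alt (nums : List Int) (n : Int) : List Int :=
  let memo := (PySem.List.pyRange 2 (n + 1) 1).foldl
    (fun memo k =>
      memo ++ [PySem.List.pyGetD memo (k - PySem.List.pyGetD memo (k - 1) 0) 0 + 1])
    [0, 1]
  PySem.List.slice memo (some 1) (some (n + 1))

-- ===== PRECONDITION & SPEC =====
def Spec_count_first (nums : List Int) (n : Int) (out : List Int) : Prop := out = count_first_alt nums n
instance (nums : List Int) (n : Int) (out : List Int) : Decidable (Spec_count_first nums n out) := by unfold Spec_count_first; infer_instance

-- ===== CLAIM (what is proved, stated in full; the proofs are below) =====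
def Claim_equal_count_first : Prop := ∀ (nums : List Int) (n : Int), Dom_count_first nums n → Spec_count_first nums n (count_first nums n)

-- ===== LEMMAS AND PROOFS =====

-- the value loop(k), computed by A's recursion with its own sufficient fuel
def Lk (k : Nat) : Int := loopA k (k : Int)

-- fuel-stability and bounds of A's recursion: any fuel ≥ k computes Lk k, and 1 ≤ Lk k ≤ k
lemma loopA_stable : ∀ k : Nat, 1 ≤ k → ∀ f : Nat, k ≤ f →
    loopA f (k : Int) = Lk k ∧ 1 ≤ Lk k ∧ Lk k ≤ (k : Int) := by
  intro k
  induction k using Nat.strong_induction_on with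
  | _ k ih =>
    intro hk f hf
    by_cases hk1 : k = 1
    · subst hk1
      obtain ⟨g, rfl⟩ : ∃ g, f = g + 1 := ⟨f - 1, by omega⟩
      simp [loopA, Lk]
    · have hk2 : 2 ≤ k := by omega
      have h1 := ih (k - 1) (by omega) (by omega) (k - 1) le_rfl
      have hv : 1 ≤ Lk (k - 1) ∧ Lk (k - 1) ≤ ((k - 1 : Nat) : Int) := h1.2
      set v : Int := Lk (k - 1) with hvdef
      have hvt : ((v.toNat : Int)) = v := Int.toNat_of_nonneg (by omega)
      set m : Nat := k - v.toNat with hmdef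
      have hmk : (k : Int) - v = (m : Int) := by
        have : (v.toNat : Int) ≤ ((k - 1 : Nat) : Int) := by rw [hvt]; exact hv.2
        push_cast [hmdef]; omega
      have hm1 : 1 ≤ m := by omega
      have hm2 : m < k := by omega
      have h2 := ih m hm2 hm1 (k - 1) (by omega)
      have key : ∀ g : Nat, k - 1 ≤ g → loopA (g + 1) (k : Int) = Lk m + 1 := by
        intro g hg
        have hga := ih (k - 1) (by omega) (by omega) g (by omega)
        have hgm := ih m hm2 hm1 g (by omega)
        have hkm1 : (k : Int) - 1 = ((k - 1 : Nat) : Int) := by push_cast; omega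
        simp only [loopA, if_neg (show (k : Int) ≠ 1 by omega)]
        rw [hkm1, hga.1, ← hvdef, hmk, hgm.1]
      have hLk : Lk k = Lk m + 1 := by
        have hkeq : k = (k - 1) + 1 := by omega
        unfold Lk
        rw [show loopA k (k : Int) = loopA ((k - 1) + 1) (k : Int) by rw [← hkeq]]
        exact key (k - 1) le_rfl
      obtain ⟨g, rfl⟩ : ∃ g, f = g + 1 := ⟨f - 1, by omega⟩
      refine ⟨?_, ?_, ?_⟩
      · rw [key g (by omega), hLk]
      · rw [hLk]; have := h2.2.1; omega
      · rw [hLk]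
        have h2b := h2.2.2
        have : (m : Int) + 1 ≤ (k : Int) := by push_cast; omega
        omega

lemma Lk_bounds (k : Nat) (hk : 1 ≤ k) : 1 ≤ Lk k ∧ Lk k ≤ (k : Int) :=
  (loopA_stable k hk k le_rfl).2

-- the recurrence in memo-array form
lemma Lk_rec (k : Nat) (hk : 2 ≤ k) : Lk k = Lk (k - (Lk (k - 1)).toNat) + 1 := by
  have h1 := loopA_stable (k - 1) (by omega) (k - 1) le_rfl
  have hv := h1.2
  have hvt : (((Lk (k - 1)).toNat : Int)) = Lk (k - 1) := Int.toNat_of_nonneg (by omega)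
  have hmk : (k : Int) - Lk (k - 1) = ((k - (Lk (k - 1)).toNat : Nat) : Int) := by
    have : ((Lk (k - 1)).toNat : Int) ≤ ((k - 1 : Nat) : Int) := by rw [hvt]; exact hv.2
    push_cast; omega
  have hm2 : k - (Lk (k - 1)).toNat < k := by omega
  have hm1 : 1 ≤ k - (Lk (k - 1)).toNat := by
    have : ((Lk (k - 1)).toNat : Int) ≤ ((k - 1 : Nat) : Int) := by rw [hvt]; exact hv.2
    push_cast at this; omega
  have h2 := loopA_stable _ hm1 (k - 1) (by omega)
  have hkm1 : (k : Int) - 1 = ((k - 1 : Nat) : Int) := by push_cast; omega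
  have hkeq : k = (k - 1) + 1 := by omega
  unfold Lk
  rw [show loopA k (k : Int) = loopA ((k - 1) + 1) (k : Int) by rw [← hkeq]]
  simp only [loopA, if_neg (show (k : Int) ≠ 1 by omega)]
  rw [hkm1, h1.1, hmk, h2.1]
  rfl

-- the memo list after B has processed keys 2..j
def M (j : Nat) : List Int := 0 :: (List.range j).map (fun t => Lk (t + 1))

lemma M_getD (j t : Nat) (h1 : 1 ≤ t) (h2 : t ≤ j) : (M j).getD t 0 = Lk t := by
  obtain ⟨s, rfl⟩ : ∃ s, t = s + 1 := ⟨t - 1, by omega⟩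
  have hs : s < j := by omega
  simp [M, List.getD_eq_getElem?_getD, List.getElem?_range, hs]

lemma fold_inv : ∀ j : Nat, 1 ≤ j →
    (PySem.List.pyRange 2 ((j : Int) + 1) 1).foldl
      (fun memo k =>
        memo ++ [PySem.List.pyGetD memo (k - PySem.List.pyGetD memo (k - 1) 0) 0 + 1])
      [0, 1] = M j := by
  intro j
  induction j with
  | zero => omega
  | succ j ih =>
    intro _
    by_cases hj : 1 ≤ j
    · have hsplit : PySem.List.pyRange 2 (((j + 1 : Nat) : Int) + 1) 1
          = PySem.List.pyRange 2 ((j : Int) + 1) 1 ++ [(j : Int) + 1] := by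
        have := PySem.List.pyRange_one_succ_right (a := 2) (b := (j : Int) + 1) (by push_cast; omega)
        push_cast
        exact this
      rw [hsplit, List.foldl_append, ih hj]
      simp only [List.foldl]
      -- inner index: memo[(j+1) - 1] = memo[j] = Lk j
      have hin : PySem.List.pyGetD (M j) ((j : Int) + 1 - 1) 0 = Lk j := by
        have : (j : Int) + 1 - 1 = ((j : Nat) : Int) := by omega
        rw [this, PySem.List.pyGetD_natCast]
        exact M_getD j j hj le_rfl
      rw [hin]
      have hb := Lk_bounds j hj
      have hvt : (((Lk j).toNat : Int)) = Lk j := Int.toNat_of_nonneg (by omega)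
      set m : Nat := j + 1 - (Lk j).toNat with hmdef
      have hmk : (j : Int) + 1 - Lk j = (m : Int) := by
        have : ((Lk j).toNat : Int) ≤ (j : Int) := by rw [hvt]; exact hb.2
        push_cast [hmdef]; omega
      have hm1 : 1 ≤ m := by omega
      have hm2 : m ≤ j := by
        have : 1 ≤ ((Lk j).toNat : Int) := by rw [hvt]; exact hb.1
        omega
      have hout : PySem.List.pyGetD (M j) ((j : Int) + 1 - Lk j) 0 = Lk m := by
        rw [hmk, PySem.List.pyGetD_natCast]
        exact M_getD j m hm1 hm2
      rw [hout]
      have hrec : Lk m + 1 = Lk (j + 1) := by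
        have := Lk_rec (j + 1) (by omega)
        simp only [Nat.add_sub_cancel] at this
        rw [this, hmdef]
      rw [hrec]
      simp [M, List.range_succ]
    · have hj0 : j = 0 := by omega
      subst hj0
      rw [show ((0 + 1 : Nat) : Int) + 1 = 2 by norm_num,
        PySem.List.pyRange_one_eq_nil (by norm_num)]
      simp [M, List.foldl]
      decide

lemma slice_pair_nil (n : Int) (h : n ≤ 0) :
    PySem.List.slice ([0, 1] : List Int) (some 1) (some (n + 1)) = [] := by
  simp [PySem.List.slice, PySem.List.clampIdx]
  split_ifs <;> simp_all <;> omega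

theorem count_first_spec : Claim_equal_count_first := by
  intro nums n _
  unfold Spec_count_first count_first count_first_alt
  by_cases hn : n ≤ 0
  · rw [PySem.List.pyRange_one_eq_nil (show (n : Int) + 1 ≤ 1 by omega),
      PySem.List.pyRange_one_eq_nil (show (n : Int) + 1 ≤ 2 by omega)]
    simp only [List.foldl, List.map]
    exact (slice_pair_nil n hn).symm
  · have hn : 0 < n := by omega
    have hj1 : 1 ≤ n.toNat := by omega
    have hcast : n = ((n.toNat : Nat) : Int) := by omega
    have hfold : (PySem.List.pyRange 2 (n + 1) 1).foldl
        (fun memo k =>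
          memo ++ [PySem.List.pyGetD memo (k - PySem.List.pyGetD memo (k - 1) 0) 0 + 1])
        [0, 1] = M n.toNat := by
      rw [show n + 1 = ((n.toNat : Nat) : Int) + 1 from by omega]
      exact fold_inv n.toNat hj1
    simp only [hfold]
    rw [PySem.List.slice_toNat (ha := by norm_num) (hb := by omega)]
    have htake : ((n + 1).toNat - (1 : Int).toNat) = n.toNat := by omega
    rw [htake, show (Int.toNat 1) = 1 from rfl]
    have hdrop : (M n.toNat).drop 1 = (List.range n.toNat).map (fun t => Lk (t + 1)) := by
      simp [M]
    rw [hdrop, List.take_of_length_le (by simp)]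
    rw [PySem.List.pyRange_one, show (n + 1 - 1).toNat = n.toNat by omega, List.map_map]
    refine List.map_congr_left ?_
    intro t _
    show loopA ((1 : Int) + (t : Int)).toNat ((1 : Int) + (t : Int)) = Lk (t + 1)
    rw [show (1 : Int) + (t : Int) = ((t + 1 : Nat) : Int) from by push_cast; ring]
    simp [Lk]
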